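-- pv_equiv track=rewrite | github.com/lucasgiumarra/grep-python | app/main.py | parse_char_group
-- ===== SOURCE A (Python) =====
-- def parse_char_group(pattern):
--     assert pattern[0] == "["
--     negate = False
--     i = 1
--     if pattern[i] == "^":
--         negate = True
--         i += 1
--     chars = set()
--     while i < len(pattern) and pattern[i] != "]":
--         chars.add(pattern[i])
--         i += 1
--     if i == len(pattern):
--         raise ValueError("Unterminated character group")
--     rest = pattern[i+1:]
--     return chars, rest, negate
-- ===== SOURCE B (Python) =====
-- def parse_char_group(pattern):
--     assert pattern[0] == "["
--     negate = pattern[1] == "^"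
--     start = 2 if negate else 1
--     idx = pattern.find("]", start)
--     if idx == -1:
--         raise ValueError("Unterminated character group")
--     return set(pattern[start:idx]), pattern[idx+1:], negate
-- ===== Notes on version B (the rewrite author's own statement) =====
-- stated objective: simpler
-- what changed: Replaces the char-by-char index-advancing while loop with a find-then-slice decomposition: locate ']' with str.find(start), then set(slice) and slice for rest.
import Mathlib
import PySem

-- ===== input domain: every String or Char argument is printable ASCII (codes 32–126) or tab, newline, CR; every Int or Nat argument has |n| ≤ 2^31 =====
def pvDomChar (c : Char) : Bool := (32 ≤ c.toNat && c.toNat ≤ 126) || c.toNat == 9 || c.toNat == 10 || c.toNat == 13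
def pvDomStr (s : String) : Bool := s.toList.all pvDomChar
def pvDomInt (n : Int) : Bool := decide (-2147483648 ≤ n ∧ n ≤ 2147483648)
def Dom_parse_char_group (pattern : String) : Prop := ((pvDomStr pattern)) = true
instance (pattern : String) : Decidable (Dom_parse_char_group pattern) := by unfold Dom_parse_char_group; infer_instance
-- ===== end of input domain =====

-- B replaces A's char-by-char index-advancing scan by a find-then-slice decomposition (simpler).

-- ===== PORT A =====
-- A's while loop, scanning the suffix from index i, accumulating the set; none = fell off the end (ValueError)
def pcgLoopA : List Char → PySem.Set String → PySem.Set String × Option (List Char)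
  | [], chars => (chars, none)
  | c :: rest, chars =>
    if c = ']' then (chars, some rest)
    else pcgLoopA rest (PySem.Set.add chars (String.ofList [c]))

def parse_char_group (pattern : String) : List String × String × Bool :=
  let l := pattern.toList
  let negate := PySem.List.pyGetD l 1 ' ' == '^'   -- pattern[1]; in range under Pre_
  let i : Nat := if negate then 2 else 1
  match pcgLoopA (l.drop i) PySem.Set.empty with
  | (_, none) => ([], "", negate)                  -- raise ValueError: excluded by Pre_
  | (chars, some rest) => (chars, String.ofList rest, negate)

-- ===== PORT B =====
def parse_char_group_alt (pattern : String) : List String × String × Bool :=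
  let l := pattern.toList
  let negate := PySem.List.pyGetD l 1 ' ' == '^'   -- pattern[1]; in range under Pre_
  let start : Nat := if negate then 2 else 1
  let idx := PySem.Chars.findFrom l [']'] (start : Int) none
  if idx = -1 then ([], "", negate)                -- raise ValueError: excluded by Pre_
  else
    (PySem.Set.ofList ((PySem.List.slice l (some (start : Int)) (some idx)).map (fun c => String.ofList [c])),
     String.ofList (PySem.List.slice l (some (idx + 1)) none),
     negate)

-- ===== PRECONDITION & SPEC =====
-- Pre_ excludes exactly the inputs where A raises: IndexError (length < 2), the failed
-- opening-bracket assert, and ValueError (unterminated group); B raises there too.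
def Pre_parse_char_group (pattern : String) : Prop :=
  2 ≤ pattern.toList.length ∧ pattern.toList[0]? = some '[' ∧
    ']' ∈ pattern.toList.drop (if pattern.toList[1]? = some '^' then 2 else 1)
instance (pattern : String) : Decidable (Pre_parse_char_group pattern) := by unfold Pre_parse_char_group; infer_instance

def pvWitness_parse_char_group : String := "[ab]c"

def Spec_parse_char_group (pattern : String) (out : List String × String × Bool) : Prop := out = parse_char_group_alt pattern
instance (pattern : String) (out : List String × String × Bool) : Decidable (Spec_parse_char_group pattern out) := by unfold Spec_parse_char_group; infer_instance

-- ===== CLAIM (what is proved, stated in full; the proofs are below) =====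
def Claim_equal_parse_char_group : Prop := ∀ (pattern : String), Dom_parse_char_group pattern → Pre_parse_char_group pattern → Spec_parse_char_group pattern (parse_char_group pattern)

-- ===== LEMMAS AND PROOFS =====

theorem pcg_singleton_prefix_iff (a : Char) (l : List Char) : [a] <+: l ↔ l.head? = some a := by
  cases l with
  | nil => simp
  | cons x xs =>
    constructor
    · rintro ⟨t, ht⟩; cases ht; rfl
    · intro h; simp at h; exact ⟨xs, by simp [h]⟩

-- A's loop on a suffix whose first ']' is at position j
theorem pcgLoopA_spec (j : Nat) : ∀ (s : List Char) (acc : PySem.Set String),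
    (hj : j < s.length) → s[j] = ']' → (∀ i, (hi : i < j) → s[i]'(by omega) ≠ ']') →
    pcgLoopA s acc = (PySem.Set.update acc ((s.take j).map (fun c => String.ofList [c])), some (s.drop (j+1))) := by
  induction j with
  | zero =>
    intro s acc hj h0 _
    cases s with
    | nil => simp at hj
    | cons c rest =>
      simp at h0
      simp [pcgLoopA, h0, PySem.Set.update]
  | succ j ih =>
    intro s acc hj h0 hlt
    cases s with
    | nil => simp at hj
    | cons c rest =>
      have hc : c ≠ ']' := hlt 0 (by omega)
      have := ih rest (PySem.Set.add acc (String.ofList [c])) (by simpa using hj) (by simpa using h0)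
        (fun i hi => by have := hlt (i+1) (by omega); simpa using this)
      simp [pcgLoopA, hc, this, PySem.Set.update]

-- the two ports agree on any start position from which a ']' is reachable
theorem pcg_main (l : List Char) (start : Nat) (negate : Bool)
    (hstart_le : start ≤ l.length) (hmem : ']' ∈ l.drop start) :
    (match pcgLoopA (l.drop start) PySem.Set.empty with
      | (_, none) => (([] : List String), "", negate)
      | (chars, some rest) => (chars, String.ofList rest, negate)) =
    (if PySem.Chars.findFrom l [']'] (start : Int) none = -1 then (([] : List String), "", negate)
     else
       (PySem.Set.ofList ((PySem.List.slice l (some (start : Int)) (some (PySem.Chars.findFrom l [']'] (start : Int) none))).map (fun c => String.ofList [c])),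
        String.ofList (PySem.List.slice l (some (PySem.Chars.findFrom l [']'] (start : Int) none + 1)) none),
        negate)) := by
  have hinfix : [']'] <:+: l.drop start := List.singleton_infix_iff ']' (l.drop start) |>.2 hmem
  have hne : PySem.Chars.findFrom l [']'] (start : Int) none ≠ -1 := by
    intro h
    exact (PySem.Chars.findFrom_natCast_eq_neg_one_iff l [']'] start hstart_le |>.1 h) hinfix
  obtain ⟨hge, hpref, hmin⟩ := PySem.Chars.findFrom_natCast_spec l [']'] start hstart_le hne
  set idxI := PySem.Chars.findFrom l [']'] (start : Int) none with hidx
  set N := idxI.toNat with hN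
  have hNge : start ≤ N := by omega
  have hNat : idxI = (N : Int) := by omega
  have hNch : l[N]? = some ']' := by
    have := (pcg_singleton_prefix_iff ']' (l.drop N)).1 hpref
    rwa [List.head?_drop] at this
  obtain ⟨hNlt, hNval⟩ := List.getElem?_eq_some_iff.mp hNch
  set j := N - start with hjdef
  have hjlt : j < (l.drop start).length := by simp [List.length_drop]; omega
  have hjch : (l.drop start)[j]'hjlt = ']' := by
    rw [List.getElem_drop]
    have h2 : l[start + j]? = some ']' := by rw [show start + j = N by omega]; exact hNch
    exact (List.getElem?_eq_some_iff.mp h2).2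
  have hjmin : ∀ i, (hi : i < j) → (l.drop start)[i]'(by omega) ≠ ']' := by
    intro i hi hcon
    apply hmin (start + i) (by omega) (by omega)
    rw [pcg_singleton_prefix_iff, List.head?_drop]
    refine List.getElem?_eq_some_iff.mpr ⟨by omega, ?_⟩
    rw [← List.getElem_drop]; exact hcon
  rw [pcgLoopA_spec j (l.drop start) PySem.Set.empty hjlt hjch hjmin]
  rw [if_neg hne]
  have hslice1 : PySem.List.slice l (some (start : Int)) (some idxI) = (l.drop start).take j := by
    rw [hNat, PySem.List.slice_natCast]
  have hslice2 : PySem.List.slice l (some (idxI + 1)) none = (l.drop start).drop (j + 1) := by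
    rw [show idxI + 1 = ((N + 1 : Nat) : Int) by omega, PySem.List.slice_from_natCast, List.drop_drop]
    congr 1; omega
  rw [hslice1, hslice2]
  have hupd : PySem.Set.update PySem.Set.empty (((l.drop start).take j).map (fun c => String.ofList [c]))
      = PySem.Set.ofList (((l.drop start).take j).map (fun c => String.ofList [c])) := by
    rw [PySem.Set.ofList_eq_foldl]; rfl
  rw [hupd]

theorem parse_char_group_spec_aux (pattern : String) (hpre : Pre_parse_char_group pattern) :
    parse_char_group pattern = parse_char_group_alt pattern := by
  obtain ⟨hlen, _h0, hmem⟩ := hpre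
  have h1lt : 1 < pattern.toList.length := by omega
  have hget : PySem.List.pyGetD pattern.toList 1 ' ' = pattern.toList[1]'h1lt := by
    rw [PySem.List.pyGetD_ofNat' pattern.toList 1 ' ']
    exact List.getD_eq_getElem _ _ h1lt
  have hopt : pattern.toList[1]? = some (pattern.toList[1]'h1lt) := List.getElem?_eq_getElem h1lt
  have hcond : (if pattern.toList[1]? = some '^' then 2 else 1)
      = (if (PySem.List.pyGetD pattern.toList 1 ' ' == '^') then 2 else 1 : Nat) := by
    rw [hget, hopt]
    by_cases hc : pattern.toList[1]'h1lt = '^' <;> simp [hc]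
  rw [hcond] at hmem
  unfold parse_char_group parse_char_group_alt
  exact pcg_main pattern.toList _ _ (by split <;> omega) hmem

-- ===== VERDICT (by name: the statement is the Claim_ definition above) =====
theorem parse_char_group_spec : Claim_equal_parse_char_group := by
  intro pattern _hdom hpre
  unfold Spec_parse_char_group
  exact parse_char_group_spec_aux pattern hpre
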